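-- pv_equiv track=rewrite | github.com/PrzemekWolw/BeamNGLevelImporter | BeamNGLevelImporter/objects/decal_road.py | _dr_fill_row_holes
-- ===== SOURCE A (Python) =====
-- def _dr_fill_row_holes(z_row):
--   n = len(z_row)
--   last = None
--   for i in range(n):
--     if z_row[i] is None:
--       z_row[i] = last
--     else:
--       last = z_row[i]
--   last = None
--   for i in range(n - 1, -1, -1):
--     if z_row[i] is None:
--       z_row[i] = last
--     else:
--       last = z_row[i]
--   return z_row
-- ===== SOURCE B (Python) =====
-- def _dr_fill_row_holes(z_row):
--   # One forward pass: fill each hole with the last value seen; buffer leading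
--   # holes (no value seen yet) and back-fill them with the first value found.
--   # Mutates z_row in place like the original.
--   last = None
--   pending = []
--   for i, v in enumerate(z_row):
--     if v is None:
--       if last is None:
--         pending.append(i)
--       else:
--         z_row[i] = last
--     else:
--       last = v
--       if pending:
--         for j in pending:
--           z_row[j] = last
--         pending.clear()
--   return z_row
-- ===== Notes on version B (the rewrite author's own statement) =====
-- stated objective: alternative
-- what changed: Replaces A's two whole-list sweeps (forward fill then backward fill) with a single forward pass that buffers the leading holes and back-fills them once the first value appears.
import Mathlib
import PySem

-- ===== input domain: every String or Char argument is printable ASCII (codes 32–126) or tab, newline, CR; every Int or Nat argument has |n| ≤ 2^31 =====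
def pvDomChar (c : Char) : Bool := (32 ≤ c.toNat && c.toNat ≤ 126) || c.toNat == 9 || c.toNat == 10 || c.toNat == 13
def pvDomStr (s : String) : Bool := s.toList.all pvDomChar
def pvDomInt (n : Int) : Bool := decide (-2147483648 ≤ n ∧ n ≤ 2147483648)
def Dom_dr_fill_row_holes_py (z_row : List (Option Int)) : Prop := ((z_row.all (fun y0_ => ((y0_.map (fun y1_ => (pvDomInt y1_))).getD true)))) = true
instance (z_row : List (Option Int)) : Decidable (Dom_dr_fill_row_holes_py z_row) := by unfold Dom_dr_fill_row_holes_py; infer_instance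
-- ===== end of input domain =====

-- B replaces A's two whole-list sweeps with a single forward pass that buffers the
-- leading holes and back-fills them at the first value (alternative decomposition);
-- both Pythons mutate z_row in place, the equivalence proved is about the return value.


-- ===== PORT A =====
-- A's forward loop 'for i: if z_row[i] is None: z_row[i] = last else: last = z_row[i]'
-- as the obvious structural scan carrying `last`; the descending loop is the same
-- scan run over the reversed list.
def pvFwdA (last : Option Int) : List (Option Int) → List (Option Int)
  | [] => []
  | none :: rest => last :: pvFwdA last rest
  | some v :: rest => some v :: pvFwdA (some v) rest

def dr_fill_row_holes_py (z_row : List (Option Int)) : List (Option Int) :=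
  let z1 := pvFwdA none z_row
  (pvFwdA none z1.reverse).reverse

-- ===== PORT B =====
-- B's single pass: while no value has been seen, holes are buffered (here: counted,
-- the buffered indices being exactly the prefix emitted at the first value); after
-- the first value, every hole takes `last`.
def pvAltRest (last : Int) : List (Option Int) → List (Option Int)
  | [] => []
  | none :: rest => some last :: pvAltRest last rest
  | some v :: rest => some v :: pvAltRest v rest

def pvAltLead (pending : Nat) : List (Option Int) → List (Option Int)
  | [] => List.replicate pending none
  | none :: rest => pvAltLead (pending + 1) rest
  | some v :: rest => List.replicate pending (some v) ++ some v :: pvAltRest v rest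

def dr_fill_row_holes_py_alt (z_row : List (Option Int)) : List (Option Int) :=
  pvAltLead 0 z_row

-- ===== PRECONDITION & SPEC =====
def Spec_dr_fill_row_holes_py (z_row : List (Option Int)) (out : List (Option Int)) : Prop := out = dr_fill_row_holes_py_alt z_row
instance (z_row : List (Option Int)) (out : List (Option Int)) : Decidable (Spec_dr_fill_row_holes_py z_row out) := by unfold Spec_dr_fill_row_holes_py; infer_instance

-- ===== CLAIM (what is proved, stated in full; the proofs are below) =====
def Claim_equal_dr_fill_row_holes_py : Prop := ∀ (z_row : List (Option Int)), Dom_dr_fill_row_holes_py z_row → Spec_dr_fill_row_holes_py z_row (dr_fill_row_holes_py z_row)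

-- ===== LEMMAS AND PROOFS =====

-- the value of `last` after scanning a list
def pvFwdLast (last : Option Int) : List (Option Int) → Option Int
  | [] => last
  | none :: rest => pvFwdLast last rest
  | some v :: rest => pvFwdLast (some v) rest

-- the first non-None element of a list (none if there is none)
def pvFirstVal : List (Option Int) → Option Int
  | [] => none
  | none :: rest => pvFirstVal rest
  | some v :: _ => some v

theorem pvFwdA_append (c : Option Int) (a b : List (Option Int)) :
    pvFwdA c (a ++ b) = pvFwdA c a ++ pvFwdA (pvFwdLast c a) b := by
  induction a generalizing c with
  | nil => simp [pvFwdA, pvFwdLast]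
  | cons x r ih =>
    cases x <;> simp [pvFwdA, pvFwdLast, ih]

theorem pvFwdLast_append (c : Option Int) (a b : List (Option Int)) :
    pvFwdLast c (a ++ b) = pvFwdLast (pvFwdLast c a) b := by
  induction a generalizing c with
  | nil => simp [pvFwdLast]
  | cons x r ih => cases x <;> simp [pvFwdLast, ih]

theorem pvFwdA_noneFree (v : Int) (l : List (Option Int)) :
    ∀ x ∈ pvFwdA (some v) l, x ≠ none := by
  induction l generalizing v with
  | nil => simp [pvFwdA]
  | cons x r ih =>
    cases x with
    | none => simpa [pvFwdA] using ih v
    | some w => simpa [pvFwdA] using ih w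

theorem pvFwdA_id_of_noneFree (c : Option Int) (l : List (Option Int))
    (h : ∀ x ∈ l, x ≠ none) : pvFwdA c l = l := by
  induction l generalizing c with
  | nil => rfl
  | cons x r ih =>
    cases x with
    | none => exact absurd rfl (h none (by simp))
    | some w =>
      simp only [pvFwdA]
      exact congrArg _ (ih _ fun y hy => h y (by simp [hy]))

theorem pvFwdLast_reverse (l : List (Option Int)) :
    pvFwdLast none l.reverse = pvFirstVal l := by
  induction l with
  | nil => rfl
  | cons x r ih =>
    cases x with
    | none => simpa [List.reverse_cons, pvFwdLast_append, pvFwdLast, pvFirstVal] using ih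
    | some v => simp [List.reverse_cons, pvFwdLast_append, pvFwdLast, pvFirstVal]

theorem pvAltRest_eq_fwd (v : Int) (l : List (Option Int)) :
    pvAltRest v l = pvFwdA (some v) l := by
  induction l generalizing v with
  | nil => rfl
  | cons x r ih => cases x <;> simp [pvAltRest, pvFwdA, ih]

theorem pvAltLead_succ (l : List (Option Int)) (k : Nat) :
    pvAltLead (k + 1) l = pvFirstVal l :: pvAltLead k l := by
  induction l generalizing k with
  | nil => simp [pvAltLead, pvFirstVal, List.replicate_succ]
  | cons x r ih =>
    cases x with
    | none => simp [pvAltLead, pvFirstVal, ih]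
    | some v => simp [pvAltLead, pvFirstVal, List.replicate_succ]

theorem pvFirstVal_fwd (l : List (Option Int)) :
    pvFirstVal (pvFwdA none l) = pvFirstVal l := by
  induction l with
  | nil => rfl
  | cons y r ih2 => cases y <;> simp [pvFwdA, pvFirstVal, ih2]

theorem pv_main (z : List (Option Int)) :
    dr_fill_row_holes_py z = dr_fill_row_holes_py_alt z := by
  induction z with
  | nil => rfl
  | cons x rest ih =>
    cases x with
    | some v =>
      have hq : ∀ y ∈ (pvFwdA (some v) rest).reverse, y ≠ none := by
        intro y hy
        exact pvFwdA_noneFree v rest y (List.mem_reverse.mp hy)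
      simp only [dr_fill_row_holes_py, dr_fill_row_holes_py_alt, pvAltLead, pvFwdA,
        List.reverse_cons, pvFwdA_append, pvFwdA_id_of_noneFree _ _ hq]
      simp [pvAltRest_eq_fwd, List.replicate]
    | none =>
      have key : pvFwdLast none (pvFwdA none rest).reverse = pvFirstVal rest := by
        rw [pvFwdLast_reverse]; exact pvFirstVal_fwd rest
      simp only [dr_fill_row_holes_py, dr_fill_row_holes_py_alt, pvFwdA,
        List.reverse_cons, pvFwdA_append, key]
      simp only [dr_fill_row_holes_py, dr_fill_row_holes_py_alt] at ih
      simp [pvAltLead, pvAltLead_succ, ih]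

-- ===== VERDICT (by name: the statement is the Claim_ definition above) =====
theorem dr_fill_row_holes_py_spec : Claim_equal_dr_fill_row_holes_py := by
  intro z _
  exact pv_main z
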